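-- pv_equiv track=rewrite | github.com/SVijayB/sequel2sql | src/ast_parsers/validator.py | _has_unterminated_string
-- ===== SOURCE A (Python) =====
-- def _has_unterminated_string(sql: str) -> bool:
--     """
--     Heuristic: track whether we end up inside an open single-quoted string.
--     Handles SQL-style escaped quotes ('') correctly.
--     """
--     in_string = False
--     i = 0
--     while i < len(sql):
--         if sql[i] == "'":
--             if in_string and i + 1 < len(sql) and sql[i + 1] == "'":
--                 i += 2
--                 continue
--             in_string = not in_string
--         i += 1
--     return in_string
-- ===== SOURCE B (Python) =====
-- def _has_unterminated_string(sql: str) -> bool: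
--     # Closed form: each real toggle flips parity once and each escaped '' pair
--     # contributes two quotes (parity unchanged), so the final in-string state
--     # is exactly the parity of the apostrophe count.
--     return sql.count("'") % 2 == 1
-- ===== Notes on version B (the rewrite author's own statement) =====
-- stated objective: simpler
-- what changed: Replaced the stateful index loop tracking an in_string flag with the closed form sql.count("'") % 2 == 1, since both a toggle and an escaped '' pair preserve the quote-count parity.
import Mathlib
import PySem

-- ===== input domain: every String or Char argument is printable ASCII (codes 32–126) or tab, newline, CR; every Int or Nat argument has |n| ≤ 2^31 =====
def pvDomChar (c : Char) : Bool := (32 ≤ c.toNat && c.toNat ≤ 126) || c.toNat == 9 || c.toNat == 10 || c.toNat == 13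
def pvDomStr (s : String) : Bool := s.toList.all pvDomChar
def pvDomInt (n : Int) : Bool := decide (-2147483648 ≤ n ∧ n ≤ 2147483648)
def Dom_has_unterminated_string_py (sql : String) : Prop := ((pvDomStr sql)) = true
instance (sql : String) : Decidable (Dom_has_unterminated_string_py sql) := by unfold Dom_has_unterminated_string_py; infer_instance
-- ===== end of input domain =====

-- B replaces A's stateful in_string scan with the parity of the apostrophe count (simpler).

-- ===== PORT A =====
-- A's while loop, transcribed over the remaining characters: the first branch is
-- Python's `sql[i]=="'" and in_string and i+1<len and sql[i+1]=="'"` (skip two chars),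
-- the second its toggle, the third the plain `i += 1` step.
def hasUntermLoopA (inString : Bool) : List Char → Bool
  | [] => inString
  | c :: rest =>
    if c = '\'' ∧ inString = true ∧ rest.head? = some '\'' then
      hasUntermLoopA inString rest.tail
    else if c = '\'' then
      hasUntermLoopA (!inString) rest
    else
      hasUntermLoopA inString rest
termination_by l => l.length
decreasing_by
  · simp [List.length_tail]
  · simp
  · simp

def has_unterminated_string_py (sql : String) : Bool :=
  hasUntermLoopA false sql.toList

-- ===== PORT B =====
def has_unterminated_string_py_alt (sql : String) : Bool :=
  PySem.Str.count sql "'" % 2 == 1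

-- ===== PRECONDITION & SPEC =====
def Spec_has_unterminated_string_py (sql : String) (out : Bool) : Prop := out = has_unterminated_string_py_alt sql
instance (sql : String) (out : Bool) : Decidable (Spec_has_unterminated_string_py sql out) := by unfold Spec_has_unterminated_string_py; infer_instance

-- ===== CLAIM (what is proved, stated in full; the proofs are below) =====
def Claim_equal_has_unterminated_string_py : Prop := ∀ (sql : String), Dom_has_unterminated_string_py sql → Spec_has_unterminated_string_py sql (has_unterminated_string_py sql)

-- ===== LEMMAS AND PROOFS =====

-- PySem.Chars.count.go with a one-character needle counts occurrences of that character.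
theorem count_go_single (c : Char) :
    ∀ (fuel : Nat) (l : List Char) (acc : Nat), l.length ≤ fuel →
      PySem.Chars.count.go [c] fuel l acc = acc + l.count c := by
  intro fuel
  induction fuel with
  | zero =>
    intro l acc h
    cases l with
    | nil => simp [PySem.Chars.count.go]
    | cons a t => simp at h
  | succ n ih =>
    intro l acc h
    cases l with
    | nil => simp [PySem.Chars.count.go]
    | cons a t =>
      simp only [PySem.Chars.count.go]
      by_cases hac : a = c
      · subst hac
        have hpre : [a].isPrefixOf (a :: t) = true := by simp [List.isPrefixOf]
        simp only [hpre, if_true, List.length_cons, List.length_nil, List.drop_succ_cons,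
          List.drop_zero]
        rw [ih t (acc + 1) (by simpa using h)]
        simp [List.count_cons]
        omega
      · have hpre : [c].isPrefixOf (a :: t) = false := by
          simp only [List.isPrefixOf, List.isPrefixOf_nil_left, Bool.and_true]
          exact beq_false_of_ne fun hc => hac hc.symm
        simp only [hpre, Bool.false_eq_true, if_false]
        rw [ih t acc (by simpa using h)]
        simp [List.count_cons, hac]

-- A's loop state equals the running parity of apostrophes seen so far.
theorem loopA_parity :
    ∀ (n : Nat) (l : List Char), l.length ≤ n → ∀ (b : Bool),
      hasUntermLoopA b l = xor b (decide (l.count '\'' % 2 = 1)) := by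
  intro n
  induction n with
  | zero =>
    intro l h b
    cases l with
    | nil => simp [hasUntermLoopA]
    | cons c rest => simp at h
  | succ n ih =>
    intro l h b
    cases l with
    | nil => simp [hasUntermLoopA]
    | cons c rest =>
      rw [hasUntermLoopA]
      split_ifs with h1 h2
      · -- escaped pair: c = ''' , b = true, rest = ''' :: rest2
        obtain ⟨hc, hb, hh⟩ := h1
        cases rest with
        | nil => simp at hh
        | cons d rest2 =>
          have hd : d = '\'' := by simpa using hh
          subst hc; subst hd; subst hb
          simp only [List.tail_cons]
          rw [ih rest2 (by simp at h; omega) true]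
          have : (rest2.count '\'' + 2) % 2 = rest2.count '\'' % 2 := by omega
          simp [List.count_cons, this, Nat.add_assoc]
      · -- toggle
        subst h2
        rw [ih rest (by simp at h; omega) (!b)]
        have hpar : decide ((rest.count '\'' + 1) % 2 = 1) = !(decide (rest.count '\'' % 2 = 1)) := by
          by_cases hk : rest.count '\'' % 2 = 1
          · simp [hk]; omega
          · simp [hk]; omega
        cases b <;> simp [List.count_cons, hpar]
      · -- ordinary character
        rw [ih rest (by simp at h; omega) b]
        simp [List.count_cons, h2]

-- ===== VERDICT (by name: the statement is the Claim_ definition above) =====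
theorem has_unterminated_string_py_spec : Claim_equal_has_unterminated_string_py := by
  intro sql _
  unfold Spec_has_unterminated_string_py has_unterminated_string_py has_unterminated_string_py_alt
  have h1 : PySem.Str.count sql "'" = sql.toList.count '\'' := by
    rw [PySem.Str.count_eq]
    show PySem.Chars.count sql.toList ['\''] = sql.toList.count '\''
    simp only [PySem.Chars.count, List.isEmpty_cons, Bool.false_eq_true, if_false]
    exact (count_go_single '\'' sql.toList.length sql.toList 0 le_rfl).trans (by simp)
  rw [loopA_parity sql.toList.length sql.toList le_rfl false, h1]
  by_cases hk : sql.toList.count '\'' % 2 = 1 <;> simp [hk]
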